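-- pv_equiv track=rewrite | github.com/dlswn422/voice-gate-poc | src/engine/app_engine.py | _pick_next_missing
-- ===== SOURCE A (Python) =====
-- from typing import Any, Dict, List, Optional, Literal, Tuple
--
-- REQUIRED_SLOTS_BY_INTENT: Dict[str, List[str]] = {
--     "PAYMENT": ["where", "symptom"],
--     "EXIT": ["where", "symptom"],
--     "ENTRY": ["where", "symptom"],
--     "REGISTRATION": ["where", "symptom"],
--     "TIME_PRICE": ["symptom"],
--     "FACILITY": ["where", "symptom"],
--     "COMPLAINT": ["symptom"],
--     "NONE": ["symptom"],
-- }
--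
-- SLOT_PRIORITY_BY_INTENT: Dict[str, List[str]] = {
--     "PAYMENT": ["where", "symptom", "card_or_device", "error_message", "attempted"],
--     "EXIT": ["where", "symptom", "when", "error_message", "attempted"],
--     "ENTRY": ["symptom", "where", "error_message", "attempted"],
--     "REGISTRATION": ["where", "symptom", "error_message", "plate_or_ticket", "attempted"],
--     "TIME_PRICE": ["symptom", "where", "plate_or_ticket", "error_message"],
--     "FACILITY": ["where", "symptom", "error_message", "attempted"],
--     "COMPLAINT": ["symptom", "where"],
--     "NONE": ["symptom", "where"],
-- }
--
-- def _norm_intent_name(x: Any) -> str: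
--     if not x:
--         return "NONE"
--     s = str(x).strip().upper()
--     if s.startswith("INTENT."):
--         s = s.split(".", 1)[-1]
--     return s if s in REQUIRED_SLOTS_BY_INTENT else "NONE"
--
-- def _pick_next_missing(intent_name: str, missing: List[str]) -> Optional[str]:
--     if not missing:
--         return None
--     prio = SLOT_PRIORITY_BY_INTENT.get(_norm_intent_name(intent_name), [])
--     for k in prio:
--         if k in missing:
--             return k
--     return missing[0]
-- ===== SOURCE B (Python) =====
-- from typing import Any, Dict, List, Optional
--
-- # Precomputed rank tables: _RANK[intent][slot] = position of slot in that
-- # intent's priority list (SLOT_PRIORITY_BY_INTENT flattened to ranks once).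
-- _RANK: Dict[str, Dict[str, int]] = {
--     "PAYMENT": {"where": 0, "symptom": 1, "card_or_device": 2, "error_message": 3, "attempted": 4},
--     "EXIT": {"where": 0, "symptom": 1, "when": 2, "error_message": 3, "attempted": 4},
--     "ENTRY": {"symptom": 0, "where": 1, "error_message": 2, "attempted": 3},
--     "REGISTRATION": {"where": 0, "symptom": 1, "error_message": 2, "plate_or_ticket": 3, "attempted": 4},
--     "TIME_PRICE": {"symptom": 0, "where": 1, "plate_or_ticket": 2, "error_message": 3},
--     "FACILITY": {"where": 0, "symptom": 1, "error_message": 2, "attempted": 3},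
--     "COMPLAINT": {"symptom": 0, "where": 1},
--     "NONE": {"symptom": 0, "where": 1},
-- }
--
-- def _norm(x: Any) -> str:
--     if not x:
--         return "NONE"
--     s = str(x).strip().upper()
--     if s.startswith("INTENT."):
--         s = s.split(".", 1)[-1]
--     return s if s in _RANK else "NONE"
--
-- def _pick_next_missing(intent_name: str, missing: List[str]) -> Optional[str]:
--     rank = _RANK[_norm(intent_name)]
--     sentinel = len(rank)
--     best: Optional[str] = None
--     best_r = sentinel + 1
--     for k in missing:
--         r = rank.get(k, sentinel)
--         if r < best_r:
--             best, best_r = k, r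
--     return best
-- ===== Notes on version B (the rewrite author's own statement) =====
-- stated objective: alternative
-- what changed: A scans the intent's priority list and probes `k in missing` for each slot, falling back to missing[0]; B flattens the priority lists into a precomputed slot->rank table and makes one accumulator pass over `missing`, keeping the first element of strictly smallest rank (unranked slots get rank len(table)), which also subsumes the empty-list guard.
import Mathlib
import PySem

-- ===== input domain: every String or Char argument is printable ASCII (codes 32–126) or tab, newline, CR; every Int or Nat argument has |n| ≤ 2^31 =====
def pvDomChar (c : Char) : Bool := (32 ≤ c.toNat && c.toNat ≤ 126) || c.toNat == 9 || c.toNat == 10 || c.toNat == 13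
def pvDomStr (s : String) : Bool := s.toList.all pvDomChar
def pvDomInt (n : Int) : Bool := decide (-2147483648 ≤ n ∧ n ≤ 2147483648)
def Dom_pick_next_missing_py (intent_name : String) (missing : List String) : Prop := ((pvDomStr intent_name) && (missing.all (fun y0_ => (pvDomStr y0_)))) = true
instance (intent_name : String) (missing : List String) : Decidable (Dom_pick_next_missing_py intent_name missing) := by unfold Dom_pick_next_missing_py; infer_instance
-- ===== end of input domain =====

-- B replaces A's priority-list scan (membership probe of `missing` per slot, fallback missing[0])
-- by a precomputed slot->rank table and a single accumulator pass over `missing`; objective: alternative.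

-- ===== PORT A =====
-- module constants and _norm_intent_name as A's Python uses them
def requiredSlotsByIntent : PySem.Dict String (List String) :=
  PySem.Dict.ofList [
    ("PAYMENT", ["where", "symptom"]),
    ("EXIT", ["where", "symptom"]),
    ("ENTRY", ["where", "symptom"]),
    ("REGISTRATION", ["where", "symptom"]),
    ("TIME_PRICE", ["symptom"]),
    ("FACILITY", ["where", "symptom"]),
    ("COMPLAINT", ["symptom"]),
    ("NONE", ["symptom"])]

def slotPriorityByIntent : PySem.Dict String (List String) :=
  PySem.Dict.ofList [
    ("PAYMENT", ["where", "symptom", "card_or_device", "error_message", "attempted"]),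
    ("EXIT", ["where", "symptom", "when", "error_message", "attempted"]),
    ("ENTRY", ["symptom", "where", "error_message", "attempted"]),
    ("REGISTRATION", ["where", "symptom", "error_message", "plate_or_ticket", "attempted"]),
    ("TIME_PRICE", ["symptom", "where", "plate_or_ticket", "error_message"]),
    ("FACILITY", ["where", "symptom", "error_message", "attempted"]),
    ("COMPLAINT", ["symptom", "where"]),
    ("NONE", ["symptom", "where"])]

-- _norm_intent_name (x is always a str here; `not x` is `x == ""`)
def pvNormIntent (x : String) : String :=
  if x = "" then "NONE"
  else
    let s := PySem.Str.upper (PySem.Str.strip x)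
    let s := if PySem.Str.startswith s "INTENT." then
        ((PySem.Str.splitMax? s "." 1).getD []).getLastD s
      else s
    if requiredSlotsByIntent.contains s then s else "NONE"

def pick_next_missing_py (intent_name : String) (missing : List String) : Option String :=
  if missing = [] then none
  else
    let prio := (slotPriorityByIntent.get? (pvNormIntent intent_name)).getD []
    -- `for k in prio: if k in missing: return k` then fall back to missing[0]
    match prio.find? (fun k => missing.contains k) with
    | some k => some k
    | none => missing.head?

-- ===== PORT B =====
-- Source B's own module constant: _RANK[intent][slot] = rank of slot in that intent's priority
def rankByIntent : PySem.Dict String (PySem.Dict String Int) :=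
  PySem.Dict.ofList [
    ("PAYMENT", PySem.Dict.ofList [("where", 0), ("symptom", 1), ("card_or_device", 2), ("error_message", 3), ("attempted", 4)]),
    ("EXIT", PySem.Dict.ofList [("where", 0), ("symptom", 1), ("when", 2), ("error_message", 3), ("attempted", 4)]),
    ("ENTRY", PySem.Dict.ofList [("symptom", 0), ("where", 1), ("error_message", 2), ("attempted", 3)]),
    ("REGISTRATION", PySem.Dict.ofList [("where", 0), ("symptom", 1), ("error_message", 2), ("plate_or_ticket", 3), ("attempted", 4)]),
    ("TIME_PRICE", PySem.Dict.ofList [("symptom", 0), ("where", 1), ("plate_or_ticket", 2), ("error_message", 3)]),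
    ("FACILITY", PySem.Dict.ofList [("where", 0), ("symptom", 1), ("error_message", 2), ("attempted", 3)]),
    ("COMPLAINT", PySem.Dict.ofList [("symptom", 0), ("where", 1)]),
    ("NONE", PySem.Dict.ofList [("symptom", 0), ("where", 1)])]

-- Source B's _norm (identical to A's normaliser except that it checks membership in _RANK)
def pvNorm (x : String) : String :=
  if x = "" then "NONE"
  else
    let s := PySem.Str.upper (PySem.Str.strip x)
    let s := if PySem.Str.startswith s "INTENT." then
        ((PySem.Str.splitMax? s "." 1).getD []).getLastD s
      else s
    if rankByIntent.contains s then s else "NONE"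

def pick_next_missing_py_alt (intent_name : String) (missing : List String) : Option String :=
  -- rank = _RANK[_norm(intent_name)]  (the key is always present: _norm returns a table key)
  let rank := (rankByIntent.get? (pvNorm intent_name)).getD PySem.Dict.empty
  -- sentinel = len(rank)
  let sentinel : Int := (rank.size : Int)
  -- for k in missing: r = rank.get(k, sentinel); keep the first strictly smaller rank
  (missing.foldl
    (fun acc k =>
      let r := rank.getD k sentinel
      if r < acc.2 then (some k, r) else acc)
    ((none : Option String), sentinel + 1)).1

-- ===== PRECONDITION & SPEC =====
def Spec_pick_next_missing_py (intent_name : String) (missing : List String) (out : Option String) : Prop := out = pick_next_missing_py_alt intent_name missing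
instance (intent_name : String) (missing : List String) (out : Option String) : Decidable (Spec_pick_next_missing_py intent_name missing out) := by unfold Spec_pick_next_missing_py; infer_instance

-- ===== CLAIM (what is proved, stated in full; the proofs are below) =====
def Claim_equal_pick_next_missing_py : Prop := ∀ (intent_name : String) (missing : List String), Dom_pick_next_missing_py intent_name missing → Spec_pick_next_missing_py intent_name missing (pick_next_missing_py intent_name missing)

-- ===== LEMMAS AND PROOFS =====

-- the two normalisers agree (the two tables have the same keys)
theorem norm_eq (x : String) : pvNorm x = pvNormIntent x := by
  unfold pvNorm pvNormIntent
  by_cases hx : x = ""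
  · simp [hx]
  · simp only [if_neg hx]
    have hc : ∀ s : String, rankByIntent.contains s = requiredSlotsByIntent.contains s := by
      intro s; rfl
    rw [hc]

-- pvNormIntent's result always has the shape `if contains s then s else "NONE"`
theorem norm_shape (x : String) :
    ∃ s : String, pvNormIntent x = if requiredSlotsByIntent.contains s then s else "NONE" := by
  unfold pvNormIntent
  by_cases hx : x = ""
  · refine ⟨"NONE", ?_⟩
    simp [hx]
  · simp only [if_neg hx]
    exact ⟨_, rfl⟩

-- so it is one of the eight table keys
theorem norm_mem (x : String) :
    pvNormIntent x = "PAYMENT" ∨ pvNormIntent x = "EXIT" ∨ pvNormIntent x = "ENTRY" ∨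
    pvNormIntent x = "REGISTRATION" ∨ pvNormIntent x = "TIME_PRICE" ∨ pvNormIntent x = "FACILITY" ∨
    pvNormIntent x = "COMPLAINT" ∨ pvNormIntent x = "NONE" := by
  obtain ⟨s, hs⟩ := norm_shape x
  rw [hs]
  by_cases hc : requiredSlotsByIntent.contains s = true
  · rw [if_pos hc]
    have hm := (PySem.Dict.contains_iff_mem_keys requiredSlotsByIntent s).mp hc
    have hk : requiredSlotsByIntent.keys =
        ["PAYMENT", "EXIT", "ENTRY", "REGISTRATION", "TIME_PRICE", "FACILITY", "COMPLAINT", "NONE"] := by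
      decide
    rw [hk] at hm
    simp only [List.mem_cons, List.not_mem_nil, or_false] at hm
    tauto
  · rw [if_neg hc]
    tauto

-- min? of a nonempty list as a running-min foldl
theorem min?_cons (key : String → Int) (x : String) (t : List String) :
    PySem.List.min? (x :: t) key
      = some (List.foldl (fun m y => if key y < key m then y else m) x t) := by
  induction t generalizing x with
  | nil => rfl
  | cons y t ih =>
    have h1 : PySem.List.min? (x :: y :: t) key
        = PySem.List.min? ((if key y < key x then y else x) :: t) key := by
      simp only [PySem.List.min?, List.foldl_cons]
      by_cases h : key y < key x <;> simp [h]
    rw [h1, ih]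
    simp only [List.foldl_cons]

theorem foldl_min_keep (key : String → Int) (x : String) (t : List String)
    (h : ∀ y ∈ t, ¬ key y < key x) :
    List.foldl (fun m y => if key y < key m then y else m) x t = x := by
  induction t with
  | nil => rfl
  | cons y t ih =>
    simp only [List.foldl_cons, if_neg (h y (by simp))]
    exact ih (fun z hz => h z (by simp [hz]))

theorem foldl_min_eq (key : String → Int) (t : List String) (x a : String)
    (ha : a = x ∨ a ∈ t)
    (hminx : key a ≤ key x) (hmint : ∀ y ∈ t, key a ≤ key y)
    (hux : key x = key a → x = a) (hut : ∀ y ∈ t, key y = key a → y = a) :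
    List.foldl (fun m y => if key y < key m then y else m) x t = a := by
  induction t generalizing x with
  | nil =>
    rcases ha with rfl | h
    · rfl
    · simp at h
  | cons z t ih =>
    simp only [List.foldl_cons]
    have hminz : key a ≤ key z := hmint z (by simp)
    have hmint' : ∀ w ∈ t, key a ≤ key w := fun w hw => hmint w (by simp [hw])
    have hut' : ∀ w ∈ t, key w = key a → w = a := fun w hw => hut w (by simp [hw])
    rcases ha with rfl | h
    · rw [if_neg (by omega)]
      exact foldl_min_keep key a t (fun w hw => by have := hmint' w hw; omega)
    · rcases List.mem_cons.mp h with heq | hat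
      · subst heq
        by_cases hlt : key a < key x
        · rw [if_pos hlt]
          exact foldl_min_keep key a t (fun w hw => by have := hmint' w hw; omega)
        · have hxa : x = a := hux (by omega)
          rw [if_neg hlt, hxa]
          exact foldl_min_keep key a t (fun w hw => by have := hmint' w hw; omega)
      · by_cases hlt : key z < key x
        · rw [if_pos hlt]
          exact ih z (Or.inr hat) hminz hmint' (fun hk => hut z (by simp) hk) hut'
        · rw [if_neg hlt]
          exact ih x (Or.inr hat) hminx hmint' hux hut'

theorem min?_eq_of (key : String → Int) (xs : List String) (a : String)
    (ha : a ∈ xs) (hmin : ∀ y ∈ xs, key a ≤ key y)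
    (huniq : ∀ y ∈ xs, key y = key a → y = a) :
    PySem.List.min? xs key = some a := by
  cases xs with
  | nil => simp at ha
  | cons x t =>
    rw [min?_cons]
    congr 1
    exact foldl_min_eq key t x a (by simpa using ha) (hmin x (by simp))
      (fun z hz => hmin z (by simp [hz])) (fun hk => huniq x (by simp) hk)
      (fun z hz hk => huniq z (by simp [hz]) hk)

theorem min?_eq_head_of_const (key : String → Int) (xs : List String) (c : Int)
    (h : ∀ y ∈ xs, key y = c) :
    PySem.List.min? xs key = xs.head? := by
  cases xs with
  | nil => rfl
  | cons x t =>
    rw [min?_cons, foldl_min_keep key x t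
      (fun z hz => by rw [h z (by simp [hz]), h x (by simp)]; omega)]
    rfl

-- A's scan of prio, characterised as a stable min over `missing` under the rank key
theorem core_equiv (prio : List String) (missing : List String) :
    (match prio.find? (fun k => missing.contains k) with
     | some k => some k
     | none => missing.head?)
      = PySem.List.min? missing
          (fun k => if k ∈ prio then ((List.idxOf k prio : Nat) : Int) else (prio.length : Int)) := by
  cases hf : prio.find? (fun k => missing.contains k) with
  | none =>
    have hnone : ∀ m ∈ missing, m ∉ prio := by
      intro m hmem hmp
      have := List.find?_eq_none.mp hf m hmp
      simp at this
      exact this hmem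
    rw [min?_eq_head_of_const _ _ (prio.length : Int)
      (fun y hy => by simp [hnone y hy])]
  | some k0 =>
    obtain ⟨hc, pre, suf, hsplit, hpre⟩ := List.find?_eq_some_iff_append.mp hf
    have hk0m : k0 ∈ missing := by simpa [List.contains_iff_mem] using hc
    have hprem : ∀ a ∈ pre, a ∉ missing := by
      intro a ha
      have := hpre a ha
      simpa using this
    have hk0pre : k0 ∉ pre := fun h => hprem k0 h hk0m
    have hk0p : k0 ∈ prio := by rw [hsplit]; simp
    have hidx0 : List.idxOf k0 prio = pre.length := by
      rw [hsplit, List.idxOf_append, if_neg hk0pre, List.idxOf_cons_self]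
      omega
    symm
    apply min?_eq_of
    · exact hk0m
    · intro y hy
      by_cases hyp : y ∈ prio
      · have hypre : y ∉ pre := fun h => hprem y h hy
        have : List.idxOf y prio = List.idxOf y (k0 :: suf) + pre.length := by
          rw [hsplit, List.idxOf_append, if_neg hypre]
        simp only [if_pos hk0p, if_pos hyp, hidx0, this]
        push_cast; omega
      · have hlen : pre.length ≤ prio.length := by rw [hsplit]; simp
        simp only [if_pos hk0p, if_neg hyp, hidx0]
        omega
    · intro y hy hkey
      by_cases hyp : y ∈ prio
      · have hypre : y ∉ pre := fun h => hprem y h hy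
        have hidxy : List.idxOf y prio = List.idxOf y (k0 :: suf) + pre.length := by
          rw [hsplit, List.idxOf_append, if_neg hypre]
        simp only [if_pos hk0p, if_pos hyp, hidx0, hidxy] at hkey
        have h0 : List.idxOf y (k0 :: suf) = 0 := by omega
        by_cases hk : k0 = y
        · exact hk.symm
        · rw [List.idxOf_cons] at h0
          simp [show (k0 == y) = false from by simpa using hk] at h0
      · have : prio.length = pre.length + suf.length + 1 := by rw [hsplit]; simp; omega
        simp only [if_pos hk0p, if_neg hyp, hidx0] at hkey
        omega

-- the rank table a priority list flattens to (proof-side model of Source B's _RANK entries)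
def toRank (prio : List String) : PySem.Dict String Int :=
  PySem.Dict.mk ((PySem.List.enumerate prio 0).map (fun p => (p.2, p.1)))

theorem mkrank_get? (prio : List String) (hnd : prio.Nodup) (s : Int) (k : String) :
    (PySem.Dict.mk ((PySem.List.enumerate prio s).map (fun p => (p.2, p.1)))).get? k
      = if k ∈ prio then some (s + (List.idxOf k prio : Int)) else none := by
  induction prio generalizing s with
  | nil => simp [PySem.List.enumerate_nil, PySem.Dict.get?]
  | cons p ps ih =>
    rw [PySem.List.enumerate_cons]
    simp only [List.map_cons, PySem.Dict.get?_mk_cons]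
    by_cases hpk : p = k
    · subst hpk
      have hni : p ∉ ps := (List.nodup_cons.mp hnd).1
      simp
    · rw [ih (List.Nodup.of_cons hnd) (s + 1)]
      have hne : (p == k) = false := by simpa using hpk
      simp only [hne, Bool.false_eq_true, if_false]
      by_cases hps : k ∈ ps
      · rw [if_pos hps, if_pos (by simp [hps])]
        rw [List.idxOf_cons, hne]
        simp only [cond_false]
        push_cast; ring_nf
      · rw [if_neg hps, if_neg (by simp [hps, Ne.symm hpk])]

theorem toRank_get? (prio : List String) (hnd : prio.Nodup) (k : String) :
    (toRank prio).get? k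
      = if k ∈ prio then some ((List.idxOf k prio : Nat) : Int) else none := by
  rw [toRank, mkrank_get? prio hnd 0 k]
  by_cases hk : k ∈ prio <;> simp [hk]

theorem toRank_size (prio : List String) : (toRank prio).size = prio.length := by
  simp [toRank, PySem.Dict.size, PySem.List.length_enumerate]

-- the single-pass fold with a (best, best_rank) accumulator computes the running min
theorem foldB (key : String → Int) (t : List String) (b : String) :
    t.foldl (fun acc k => if key k < acc.2 then ((some k : Option String), key k) else acc)
        (some b, key b)
      = (some (t.foldl (fun m y => if key y < key m then y else m) b),
         key (t.foldl (fun m y => if key y < key m then y else m) b)) := by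
  induction t generalizing b with
  | nil => rfl
  | cons y t ih =>
    simp only [List.foldl_cons]
    by_cases h : key y < key b
    · simp only [h, if_true]
      exact ih y
    · simp only [h, if_false]
      exact ih b

-- one cons step of B's accumulator fold, for an abstract key
theorem coreB (key : String → Int) (c : Int) (x : String) (t : List String)
    (hle : key x < c) :
    ((x :: t).foldl (fun acc k => if key k < acc.2 then ((some k : Option String), key k) else acc)
        ((none : Option String), c)).1
      = some (t.foldl (fun m y => if key y < key m then y else m) x) := by
  rw [List.foldl_cons]
  show (List.foldl (fun acc k => if key k < acc.2 then ((some k : Option String), key k) else acc)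
      (if key x < c then ((some x : Option String), key x) else ((none : Option String), c)) t).1 = _
  rw [if_pos hle, foldB key t x]

-- the core bridge: A's body equals B's body once the rank table flattens the priority list
theorem bridge (prio : List String) (hnd : prio.Nodup) (rk : PySem.Dict String Int)
    (hrk : rk = toRank prio) (missing : List String) :
    (if missing = [] then none
     else match prio.find? (fun k => missing.contains k) with
          | some k => some k
          | none => missing.head?)
      = (missing.foldl
          (fun acc k =>
            if rk.getD k ((rk.size : Nat) : Int) < acc.2
            then ((some k : Option String), rk.getD k ((rk.size : Nat) : Int)) else acc)
          ((none : Option String), ((rk.size : Nat) : Int) + 1)).1 := by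
  subst hrk
  have hkey : ∀ k, (toRank prio).getD k (((toRank prio).size : Nat) : Int)
      = if k ∈ prio then ((List.idxOf k prio : Nat) : Int) else (prio.length : Int) := by
    intro k
    rw [PySem.Dict.getD_eq_get?_getD, toRank_size, toRank_get? prio hnd k]
    by_cases hk : k ∈ prio <;> simp [hk]
  have hfun : (fun (acc : Option String × Int) k =>
        if (toRank prio).getD k (((toRank prio).size : Nat) : Int) < acc.2
        then ((some k : Option String), (toRank prio).getD k (((toRank prio).size : Nat) : Int)) else acc)
      = (fun (acc : Option String × Int) k =>
          if (if k ∈ prio then ((List.idxOf k prio : Nat) : Int) else (prio.length : Int)) < acc.2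
          then ((some k : Option String),
            (if k ∈ prio then ((List.idxOf k prio : Nat) : Int) else (prio.length : Int))) else acc) := by
    funext acc k; rw [hkey]
  cases missing with
  | nil => rfl
  | cons x t =>
    rw [if_neg (by simp), core_equiv prio (x :: t), min?_cons, hfun]
    have hS : (((toRank prio).size : Nat) : Int) = (prio.length : Int) := by
      rw [toRank_size]
    rw [hS]
    have hle : (if x ∈ prio then ((List.idxOf x prio : Nat) : Int) else (prio.length : Int))
        < (prio.length : Int) + 1 := by
      by_cases hx : x ∈ prio
      · have := List.idxOf_lt_length_of_mem hx
        simp only [hx, if_true]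
        omega
      · simp only [hx, if_false]
        omega
    exact (coreB (fun k => if k ∈ prio then ((List.idxOf k prio : Nat) : Int) else (prio.length : Int))
      ((prio.length : Int) + 1) x t hle).symm

-- ===== VERDICT (by name: the statement is the Claim_ definition above) =====
theorem pick_next_missing_py_spec : Claim_equal_pick_next_missing_py := by
  intro intent missing _
  unfold Spec_pick_next_missing_py pick_next_missing_py pick_next_missing_py_alt
  rw [norm_eq]
  rcases norm_mem intent with h | h | h | h | h | h | h | h <;> rw [h] <;>
    exact bridge _ (by decide) _ (by decide) missing
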